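-- pv_equiv track=rewrite | github.com/avniproject/avni-ai | src/bundle/scoping_parser.py | _clean_subject_name
-- ===== SOURCE A (Python) =====
-- _SUBJECT_NAME_STRIP_SUFFIXES = [
--     " registration",
--     " enrolment",
--     " enrollment",
--     " form",
--     " profile",
--     " details",
--     " entry",
-- ]
--
-- def _clean_subject_name(raw: str) -> str:
--     """Clean a subject type name: strip form-like suffixes.
--     'Beneficiary Registration' → 'Beneficiary'
--     'School Registration' → 'School'
--     """
--     name = raw.strip()
--     lower = name.lower()
--     for suffix in _SUBJECT_NAME_STRIP_SUFFIXES: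
--         if lower.endswith(suffix):
--             name = name[: len(name) - len(suffix)].strip()
--             break
--     return name
-- ===== SOURCE B (Python) =====
-- _SUFFIX_WORDS = frozenset({
--     "registration", "enrolment", "enrollment",
--     "form", "profile", "details", "entry",
-- })
--
-- def _clean_subject_name(raw: str) -> str:
--     name = raw.strip()
--     i = len(name)
--     while i > 0 and name[i - 1] != " ":
--         i -= 1
--     if i > 0 and name[i:].lower() in _SUFFIX_WORDS:
--         return name[: i - 1].strip()
--     return name
-- ===== Notes on version B (the rewrite author's own statement) =====
-- stated objective: alternative
-- what changed: Instead of looping over the seven suffix strings testing endswith on the lowercased full name, B scans backwards once to the last space and looks the final word (lowercased) up in a frozenset of suffix words.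
import Mathlib
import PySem

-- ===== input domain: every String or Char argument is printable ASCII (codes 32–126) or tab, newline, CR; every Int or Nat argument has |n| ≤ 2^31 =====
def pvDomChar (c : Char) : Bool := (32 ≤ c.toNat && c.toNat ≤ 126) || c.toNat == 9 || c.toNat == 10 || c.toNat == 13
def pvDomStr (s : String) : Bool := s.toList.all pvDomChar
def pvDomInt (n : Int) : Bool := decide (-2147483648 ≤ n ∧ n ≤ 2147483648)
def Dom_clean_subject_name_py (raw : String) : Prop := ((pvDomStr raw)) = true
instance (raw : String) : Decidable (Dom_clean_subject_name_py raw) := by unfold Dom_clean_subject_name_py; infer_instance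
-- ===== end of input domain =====

-- B replaces A's seven endswith probes by one backward scan to the last space plus a set lookup
-- of the final word (objective: alternative/idiomatic; same value everywhere).

-- ===== PORT A =====
-- module constant _SUBJECT_NAME_STRIP_SUFFIXES, as code-point lists
def pySuffixes : List (List Char) :=
  [" registration".toList, " enrolment".toList, " enrollment".toList,
   " form".toList, " profile".toList, " details".toList, " entry".toList]

-- the for-loop over the suffixes: first match cuts and breaks, no match keeps name
def aLoop (name lower : List Char) : List (List Char) → List Char
  | [] => name
  | s :: rest =>
    if PySem.Chars.endswith lower s then
      PySem.Chars.strip (PySem.List.slice name none (some ((name.length : Int) - (s.length : Int))))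
    else aLoop name lower rest

def clean_subject_name_py (raw : String) : String :=
  let name := PySem.Str.strip raw
  let lower := PySem.Str.lower name
  String.mk (aLoop name.toList lower.toList pySuffixes)

-- ===== PORT B =====
-- Source B's _SUFFIX_WORDS frozenset
def suffixWords : List (List Char) :=
  PySem.Set.ofList
    ["registration".toList, "enrolment".toList, "enrollment".toList,
     "form".toList, "profile".toList, "details".toList, "entry".toList]

-- Source B's `while i > 0 and name[i-1] != " ": i -= 1`, as recursion on i
def bScan (name : List Char) : Nat → Nat
  | 0 => 0
  | i + 1 => if name.getD i ' ' ≠ ' ' then bScan name i else i + 1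

def clean_subject_name_py_alt (raw : String) : String :=
  let name := (PySem.Str.strip raw).toList
  let i := bScan name name.length
  if 0 < i ∧ PySem.Chars.lower (PySem.List.slice name (some (i : Int)) none) ∈ suffixWords then
    String.mk (PySem.Chars.strip (PySem.List.slice name none (some ((i : Int) - 1))))
  else
    String.mk name

-- ===== PRECONDITION & SPEC =====
def Spec_clean_subject_name_py (raw : String) (out : String) : Prop := out = clean_subject_name_py_alt raw
instance (raw : String) (out : String) : Decidable (Spec_clean_subject_name_py raw out) := by unfold Spec_clean_subject_name_py; infer_instance

-- ===== CLAIM (what is proved, stated in full; the proofs are below) =====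
def Claim_equal_clean_subject_name_py : Prop := ∀ (raw : String), Dom_clean_subject_name_py raw → Spec_clean_subject_name_py raw (clean_subject_name_py raw)

-- ===== LEMMAS AND PROOFS =====

lemma bScan_le (n : List Char) : ∀ i, bScan n i ≤ i := by
  intro i
  induction i with
  | zero => simp [bScan]
  | succ i ih =>
    simp only [bScan]
    split
    · omega
    · omega

lemma bScan_boundary (n : List Char) (i : Nat) :
    bScan n i = 0 ∨ n.getD (bScan n i - 1) ' ' = ' ' := by
  induction i with
  | zero => left; rfl
  | succ i ih =>
    by_cases hc : n.getD i ' ' ≠ ' '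
    · rw [bScan, if_pos hc]; exact ih
    · rw [bScan, if_neg hc]
      right
      simpa using not_ne_iff.mp hc

lemma bScan_unique (n : List Char) :
    ∀ i k, k ≤ i → (k = 0 ∨ n.getD (k - 1) ' ' = ' ') →
      (∀ j, k ≤ j → j < i → n.getD j ' ' ≠ ' ') → bScan n i = k := by
  intro i
  induction i with
  | zero => intro k hk _ _; simp [bScan]; omega
  | succ i ih =>
    intro k hk hb hall
    by_cases hc : n.getD i ' ' ≠ ' '
    · rw [bScan, if_pos hc]
      apply ih k ?_ hb ?_
      · rcases Nat.lt_succ_iff_lt_or_eq.mp (Nat.lt_succ_of_le hk) with h | h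
        · omega
        · exfalso
          rcases hb with h0 | hsp
          · omega
          · have : k - 1 = i := by omega
            rw [this] at hsp
            exact hc hsp
      · intro j hj1 hj2; exact hall j hj1 (by omega)
    · rw [bScan, if_neg hc]
      push_neg at hc
      by_contra hne
      have hki : k ≤ i := by omega
      exact hall i hki (Nat.lt_succ_self i) hc

lemma lowerChar_space_iff (c : Char) : PySem.Chars.lowerChar c = ' ' ↔ c = ' ' := by
  constructor
  · intro h
    unfold PySem.Chars.lowerChar PySem.Chars.isupper at h
    split_ifs at h with hu
    · exfalso
      simp only [Bool.and_eq_true, decide_eq_true_eq] at hu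
      have h1 : ('A' : Char).toNat ≤ c.toNat := hu.1
      have h2 : c.toNat ≤ ('Z' : Char).toNat := hu.2
      have hZ : ('Z' : Char).toNat = 90 := by decide
      have hA : ('A' : Char).toNat = 65 := by decide
      have hval : Nat.isValidChar (c.toNat + 32) := by left; omega
      have hv : (Char.ofNat (c.toNat + 32)).toNat = c.toNat + 32 := by
        rw [Char.toNat_ofNat, if_pos hval]
      have h3 := congrArg Char.toNat h
      rw [hv] at h3
      have hsp : (' ' : Char).toNat = 32 := by decide
      omega
    · exact h
  · intro h; subst h; decide

-- endswith of " "+w on the lowered name ⟺ bScan stops past a space and the lowered tail is w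
lemma endswith_char (n w : List Char) (hw : ' ' ∉ w) :
    PySem.Chars.endswith (PySem.Chars.lower n) (' ' :: w) = true ↔
      (0 < bScan n n.length ∧ PySem.Chars.lower (n.drop (bScan n n.length)) = w) := by
  rw [PySem.Chars.endswith_iff, List.suffix_iff_eq_drop]
  simp only [PySem.Chars.lower, List.length_map, List.length_cons]
  constructor
  · intro h
    have hlen : w.length + 1 ≤ n.length := by
      have := congrArg List.length h
      simp at this
      omega
    set m := n.length - (w.length + 1) with hm
    have hd : List.map PySem.Chars.lowerChar (n.drop m) = ' ' :: w := by
      rw [List.map_drop]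
      exact (by simpa [hm] using h.symm)
    cases hdrop : n.drop m with
    | nil => rw [hdrop] at hd; simp at hd
    | cons c t =>
      rw [hdrop] at hd
      simp only [List.map_cons, List.cons.injEq] at hd
      obtain ⟨hc, ht⟩ := hd
      have hcsp : c = ' ' := (lowerChar_space_iff c).mp hc
      have hmlt : m < n.length := by omega
      have hcm : n[m]? = some c := by
        rw [← List.head?_drop, hdrop]; rfl
      have hdropt : n.drop (m + 1) = t := by
        have h1 : (n.drop m).drop 1 = t := by rw [hdrop]; rfl
        rw [List.drop_drop] at h1
        simpa [Nat.add_comm] using h1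
      have htlen : t.length = n.length - (m + 1) := by
        rw [← hdropt]; simp
      have hk : bScan n n.length = m + 1 := by
        apply bScan_unique n n.length (m + 1) (by omega)
        · right
          simp only [Nat.add_sub_cancel]
          simp [List.getD_eq_getElem?_getD, hcm, hcsp]
        · intro j hj1 hj2
          have hdj : n.drop j = t.drop (j - (m + 1)) := by
            rw [← hdropt, List.drop_drop]
            have : m + 1 + (j - (m + 1)) = j := by omega
            rw [this]
          have hj : n[j]? = t[j - (m + 1)]? := by
            rw [← List.head?_drop, ← List.head?_drop, hdj]
          have hlt : j - (m + 1) < t.length := by omega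
          intro hsp
          have hnj : n[j] = ' ' := by
            rw [List.getD_eq_getElem?_getD, List.getElem?_eq_getElem (by omega : j < n.length)] at hsp
            simpa using hsp
          have h2 : t[j - (m + 1)] = ' ' := by
            rw [List.getElem?_eq_getElem (by omega : j < n.length),
              List.getElem?_eq_getElem hlt, hnj] at hj
            simpa using hj.symm
          have hmem : (' ' : Char) ∈ t := h2 ▸ List.getElem_mem hlt
          have hmm : PySem.Chars.lowerChar ' ' ∈ List.map PySem.Chars.lowerChar t :=
            List.mem_map_of_mem hmem
          rw [ht] at hmm
          have : (' ' : Char) ∈ w := by simpa using hmm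
          exact hw this
      rw [hk, hdropt]
      exact ⟨by omega, by simpa [PySem.Chars.lower] using ht⟩
  · rintro ⟨hk, ht⟩
    have hkle : bScan n n.length ≤ n.length := bScan_le n n.length
    have hb : n.getD (bScan n n.length - 1) ' ' = ' ' := by
      rcases bScan_boundary n n.length with h0 | hs
      · omega
      · exact hs
    have hk1 : bScan n n.length - 1 < n.length :=
      Nat.lt_of_lt_of_le (Nat.sub_lt hk Nat.one_pos) hkle
    have hcons : n.drop (bScan n n.length - 1) = n[bScan n n.length - 1] :: n.drop (bScan n n.length) := by
      rw [List.drop_eq_getElem_cons hk1, Nat.sub_add_cancel hk]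
    have hgk : n[bScan n n.length - 1] = ' ' := by
      rw [List.getD_eq_getElem?_getD, List.getElem?_eq_getElem hk1] at hb
      simpa using hb
    have hwlen : w.length = n.length - bScan n n.length := by
      have := congrArg List.length ht
      simp at this
      omega
    have hidx : n.length - (w.length + 1) = bScan n n.length - 1 := by omega
    rw [hidx, ← List.map_drop, hcons]
    simp only [List.map_cons, hgk, List.cons.injEq]
    exact ⟨by decide, ht.symm⟩

lemma aLoop_skip (n s : List Char) (rest : List (List Char))
    (hf : PySem.Chars.endswith (PySem.Chars.lower n) s = false) :
    aLoop n (PySem.Chars.lower n) (s :: rest) = aLoop n (PySem.Chars.lower n) rest := by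
  simp [aLoop, hf]

lemma aLoop_hit (n s : List Char) (rest : List (List Char))
    (ht : PySem.Chars.endswith (PySem.Chars.lower n) s = true) :
    aLoop n (PySem.Chars.lower n) (s :: rest) =
      PySem.Chars.strip (PySem.List.slice n none (some ((n.length : Int) - (s.length : Int)))) := by
  simp [aLoop, ht]

lemma ends_false_of_ne (n w : List Char) (hw : ' ' ∉ w)
    (h : ¬ (0 < bScan n n.length ∧ PySem.Chars.lower (n.drop (bScan n n.length)) = w)) :
    PySem.Chars.endswith (PySem.Chars.lower n) (' ' :: w) = false := by
  rw [Bool.eq_false_iff, Ne, endswith_char n w hw]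
  exact h

lemma cut_eq (n w : List Char) (hk : 0 < bScan n n.length)
    (hL : PySem.Chars.lower (n.drop (bScan n n.length)) = w) :
    PySem.Chars.strip (PySem.List.slice n none (some ((n.length : Int) - (((' ' :: w) : List Char).length : Int)))) =
    PySem.Chars.strip (PySem.List.slice n none (some ((bScan n n.length : Int) - 1))) := by
  have hkle : bScan n n.length ≤ n.length := bScan_le n n.length
  have hwlen : w.length = n.length - bScan n n.length := by
    have := congrArg List.length hL
    simp [PySem.Chars.lower] at this
    omega
  have hx : ((n.length : Int) - (((' ' :: w) : List Char).length : Int)) = (bScan n n.length : Int) - 1 := by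
    simp only [List.length_cons]
    push_cast
    omega
  rw [hx]

lemma aLoop_eq (n : List Char) :
    aLoop n (PySem.Chars.lower n) pySuffixes =
      if 0 < bScan n n.length ∧
          PySem.Chars.lower (PySem.List.slice n (some (bScan n n.length : Int)) none) ∈ suffixWords then
        PySem.Chars.strip (PySem.List.slice n none (some ((bScan n n.length : Int) - 1)))
      else n := by
  have hslice : PySem.List.slice n (some (bScan n n.length : Int)) none = n.drop (bScan n n.length) := by
    rw [PySem.List.slice_from n (by positivity)]
    simp
  rw [hslice]
  have hps : pySuffixes =
      [' ' :: "registration".toList, ' ' :: "enrolment".toList, ' ' :: "enrollment".toList,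
       ' ' :: "form".toList, ' ' :: "profile".toList, ' ' :: "details".toList,
       ' ' :: "entry".toList] := by decide
  rw [hps]
  by_cases hc : 0 < bScan n n.length ∧
      PySem.Chars.lower (n.drop (bScan n n.length)) ∈ suffixWords
  · rw [if_pos hc]
    obtain ⟨hk, hmem⟩ := hc
    have hmem' := hmem
    simp only [suffixWords, PySem.Set.mem_ofList, List.mem_cons, List.not_mem_nil, or_false] at hmem'
    rcases hmem' with hL | hL | hL | hL | hL | hL | hL
    · -- word "registration"
      rw [aLoop_hit n _ _ ((endswith_char n "registration".toList (by decide)).mpr ⟨hk, hL⟩)]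
      exact cut_eq n "registration".toList hk hL
    · -- word "enrolment"
      rw [aLoop_skip n _ _ (ends_false_of_ne n "registration".toList (by decide)
        (by rintro ⟨-, h⟩; exact absurd (hL.symm.trans h) (by decide)))]
      rw [aLoop_hit n _ _ ((endswith_char n "enrolment".toList (by decide)).mpr ⟨hk, hL⟩)]
      exact cut_eq n "enrolment".toList hk hL
    · -- word "enrollment"
      rw [aLoop_skip n _ _ (ends_false_of_ne n "registration".toList (by decide)
        (by rintro ⟨-, h⟩; exact absurd (hL.symm.trans h) (by decide)))]
      rw [aLoop_skip n _ _ (ends_false_of_ne n "enrolment".toList (by decide)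
        (by rintro ⟨-, h⟩; exact absurd (hL.symm.trans h) (by decide)))]
      rw [aLoop_hit n _ _ ((endswith_char n "enrollment".toList (by decide)).mpr ⟨hk, hL⟩)]
      exact cut_eq n "enrollment".toList hk hL
    · -- word "form"
      rw [aLoop_skip n _ _ (ends_false_of_ne n "registration".toList (by decide)
        (by rintro ⟨-, h⟩; exact absurd (hL.symm.trans h) (by decide)))]
      rw [aLoop_skip n _ _ (ends_false_of_ne n "enrolment".toList (by decide)
        (by rintro ⟨-, h⟩; exact absurd (hL.symm.trans h) (by decide)))]
      rw [aLoop_skip n _ _ (ends_false_of_ne n "enrollment".toList (by decide)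
        (by rintro ⟨-, h⟩; exact absurd (hL.symm.trans h) (by decide)))]
      rw [aLoop_hit n _ _ ((endswith_char n "form".toList (by decide)).mpr ⟨hk, hL⟩)]
      exact cut_eq n "form".toList hk hL
    · -- word "profile"
      rw [aLoop_skip n _ _ (ends_false_of_ne n "registration".toList (by decide)
        (by rintro ⟨-, h⟩; exact absurd (hL.symm.trans h) (by decide)))]
      rw [aLoop_skip n _ _ (ends_false_of_ne n "enrolment".toList (by decide)
        (by rintro ⟨-, h⟩; exact absurd (hL.symm.trans h) (by decide)))]
      rw [aLoop_skip n _ _ (ends_false_of_ne n "enrollment".toList (by decide)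
        (by rintro ⟨-, h⟩; exact absurd (hL.symm.trans h) (by decide)))]
      rw [aLoop_skip n _ _ (ends_false_of_ne n "form".toList (by decide)
        (by rintro ⟨-, h⟩; exact absurd (hL.symm.trans h) (by decide)))]
      rw [aLoop_hit n _ _ ((endswith_char n "profile".toList (by decide)).mpr ⟨hk, hL⟩)]
      exact cut_eq n "profile".toList hk hL
    · -- word "details"
      rw [aLoop_skip n _ _ (ends_false_of_ne n "registration".toList (by decide)
        (by rintro ⟨-, h⟩; exact absurd (hL.symm.trans h) (by decide)))]
      rw [aLoop_skip n _ _ (ends_false_of_ne n "enrolment".toList (by decide)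
        (by rintro ⟨-, h⟩; exact absurd (hL.symm.trans h) (by decide)))]
      rw [aLoop_skip n _ _ (ends_false_of_ne n "enrollment".toList (by decide)
        (by rintro ⟨-, h⟩; exact absurd (hL.symm.trans h) (by decide)))]
      rw [aLoop_skip n _ _ (ends_false_of_ne n "form".toList (by decide)
        (by rintro ⟨-, h⟩; exact absurd (hL.symm.trans h) (by decide)))]
      rw [aLoop_skip n _ _ (ends_false_of_ne n "profile".toList (by decide)
        (by rintro ⟨-, h⟩; exact absurd (hL.symm.trans h) (by decide)))]
      rw [aLoop_hit n _ _ ((endswith_char n "details".toList (by decide)).mpr ⟨hk, hL⟩)]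
      exact cut_eq n "details".toList hk hL
    · -- word "entry"
      rw [aLoop_skip n _ _ (ends_false_of_ne n "registration".toList (by decide)
        (by rintro ⟨-, h⟩; exact absurd (hL.symm.trans h) (by decide)))]
      rw [aLoop_skip n _ _ (ends_false_of_ne n "enrolment".toList (by decide)
        (by rintro ⟨-, h⟩; exact absurd (hL.symm.trans h) (by decide)))]
      rw [aLoop_skip n _ _ (ends_false_of_ne n "enrollment".toList (by decide)
        (by rintro ⟨-, h⟩; exact absurd (hL.symm.trans h) (by decide)))]
      rw [aLoop_skip n _ _ (ends_false_of_ne n "form".toList (by decide)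
        (by rintro ⟨-, h⟩; exact absurd (hL.symm.trans h) (by decide)))]
      rw [aLoop_skip n _ _ (ends_false_of_ne n "profile".toList (by decide)
        (by rintro ⟨-, h⟩; exact absurd (hL.symm.trans h) (by decide)))]
      rw [aLoop_skip n _ _ (ends_false_of_ne n "details".toList (by decide)
        (by rintro ⟨-, h⟩; exact absurd (hL.symm.trans h) (by decide)))]
      rw [aLoop_hit n _ _ ((endswith_char n "entry".toList (by decide)).mpr ⟨hk, hL⟩)]
      exact cut_eq n "entry".toList hk hL
  · rw [if_neg hc]
    rw [aLoop_skip n _ _ (ends_false_of_ne n "registration".toList (by decide)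
      (fun ⟨hk0, hEq⟩ => hc ⟨hk0, by rw [hEq]; decide⟩))]
    rw [aLoop_skip n _ _ (ends_false_of_ne n "enrolment".toList (by decide)
      (fun ⟨hk0, hEq⟩ => hc ⟨hk0, by rw [hEq]; decide⟩))]
    rw [aLoop_skip n _ _ (ends_false_of_ne n "enrollment".toList (by decide)
      (fun ⟨hk0, hEq⟩ => hc ⟨hk0, by rw [hEq]; decide⟩))]
    rw [aLoop_skip n _ _ (ends_false_of_ne n "form".toList (by decide)
      (fun ⟨hk0, hEq⟩ => hc ⟨hk0, by rw [hEq]; decide⟩))]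
    rw [aLoop_skip n _ _ (ends_false_of_ne n "profile".toList (by decide)
      (fun ⟨hk0, hEq⟩ => hc ⟨hk0, by rw [hEq]; decide⟩))]
    rw [aLoop_skip n _ _ (ends_false_of_ne n "details".toList (by decide)
      (fun ⟨hk0, hEq⟩ => hc ⟨hk0, by rw [hEq]; decide⟩))]
    rw [aLoop_skip n _ _ (ends_false_of_ne n "entry".toList (by decide)
      (fun ⟨hk0, hEq⟩ => hc ⟨hk0, by rw [hEq]; decide⟩))]
    rfl

-- ===== VERDICT (by name: the statement is the Claim_ definition above) =====
theorem clean_subject_name_py_spec : Claim_equal_clean_subject_name_py := by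
  intro raw _
  unfold Spec_clean_subject_name_py
  simp only [clean_subject_name_py, clean_subject_name_py_alt, PySem.Str.toList_lower]
  rw [aLoop_eq, apply_ite String.mk]
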